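-- pv_equiv track=rewrite | github.com/DGIorio/import_bpr_models | import_bp_ps3_19_models.py | get_triangle_from_trianglestrip
-- ===== SOURCE A (Python) =====
-- def get_triangle_from_trianglestrip(TriStrip, vertices_count):
-- 	indices_buffer = []
-- 	cte = 0
-- 	for i in range(2, len(TriStrip)):
-- 		if TriStrip[i] == 65535 or TriStrip[i-1] == 65535 or TriStrip[i-2] == 65535:
-- 			if i%2==0:
-- 				cte = -1
-- 			else:
-- 				cte = 0
-- 			pass
-- 		else:
-- 			if (i+cte)%2==0:
-- 				a = TriStrip[i-2]
-- 				b = TriStrip[i-1]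
-- 				c = TriStrip[i]
-- 			else:
-- 				a = TriStrip[i-1]
-- 				b = TriStrip[i-2]
-- 				c = TriStrip[i]
-- 			if a != b and b != c and c != a:
-- 				if (a < vertices_count) and (b < vertices_count) and (c < vertices_count):
-- 					indices_buffer.append([a, b, c])
-- 	return indices_buffer
-- ===== SOURCE B (Python) =====
-- def get_triangle_from_trianglestrip(TriStrip, vertices_count):
--     # split on the 65535 restart sentinel into segments, then emit triangles per segment by local parity
--     segments = []
--     cur = []
--     for v in TriStrip:
--         if v == 65535:
--             segments.append(cur)
--             cur = []
--         else:
--             cur.append(v)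
--     segments.append(cur)
--     out = []
--     for seg in segments:
--         for j in range(len(seg) - 2):
--             if j % 2 == 0:
--                 a, b, c = seg[j], seg[j + 1], seg[j + 2]
--             else:
--                 a, b, c = seg[j + 1], seg[j], seg[j + 2]
--             if a != b and b != c and c != a and a < vertices_count and b < vertices_count and c < vertices_count:
--                 out.append([a, b, c])
--     return out
-- ===== Notes on version B (the rewrite author's own statement) =====
-- stated objective: alternative
-- what changed: Replaced the single flat index loop with its stateful 'cte' parity-correction variable by a two-level traversal: split the strip into maximal 65535-free segments first, then emit each segment's triangles by local index parity.
import Mathlib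
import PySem

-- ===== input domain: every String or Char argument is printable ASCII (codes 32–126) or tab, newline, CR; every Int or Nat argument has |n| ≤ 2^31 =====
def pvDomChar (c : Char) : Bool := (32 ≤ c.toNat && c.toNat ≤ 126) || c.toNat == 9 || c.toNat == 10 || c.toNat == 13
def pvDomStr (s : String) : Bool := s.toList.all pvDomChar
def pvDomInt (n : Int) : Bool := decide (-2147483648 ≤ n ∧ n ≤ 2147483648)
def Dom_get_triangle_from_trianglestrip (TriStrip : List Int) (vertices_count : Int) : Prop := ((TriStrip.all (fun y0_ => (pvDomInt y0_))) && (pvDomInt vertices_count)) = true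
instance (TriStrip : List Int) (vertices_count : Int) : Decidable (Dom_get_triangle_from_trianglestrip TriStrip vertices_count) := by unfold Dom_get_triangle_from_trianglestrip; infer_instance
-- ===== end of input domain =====

-- B replaces A's flat loop with a 'cte' parity corrector by a split-into-segments-then-emit-by-local-parity traversal (alternative decomposition, same cost).

-- ===== PORT A =====
-- loop body of A's 'for i in range(2, len(TriStrip))'; state = (indices_buffer, cte)
def aStep (ts : List Int) (vc : Int) (st : List (List Int) × Int) (i : Int) : List (List Int) × Int :=
  if PySem.List.pyGetD ts i 0 = 65535 ∨ PySem.List.pyGetD ts (i-1) 0 = 65535 ∨ PySem.List.pyGetD ts (i-2) 0 = 65535 then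
    (st.1, if PySem.Int.mod i 2 = 0 then -1 else 0)
  else
    let a := if PySem.Int.mod (i + st.2) 2 = 0 then PySem.List.pyGetD ts (i-2) 0 else PySem.List.pyGetD ts (i-1) 0
    let b := if PySem.Int.mod (i + st.2) 2 = 0 then PySem.List.pyGetD ts (i-1) 0 else PySem.List.pyGetD ts (i-2) 0
    let c := PySem.List.pyGetD ts i 0
    if a ≠ b ∧ b ≠ c ∧ c ≠ a then
      if a < vc ∧ b < vc ∧ c < vc then (st.1 ++ [[a, b, c]], st.2) else st
    else st

def get_triangle_from_trianglestrip (TriStrip : List Int) (vertices_count : Int) : List (List Int) :=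
  ((PySem.List.pyRange 2 (PySem.List.len TriStrip) 1).foldl (aStep TriStrip vertices_count) ([], 0)).1

-- ===== PORT B =====
-- B's first loop: split on the 65535 sentinel; state = (segments, cur)
def bSplitStep (st : List (List Int) × List Int) (v : Int) : List (List Int) × List Int :=
  if v = 65535 then (st.1 ++ [st.2], []) else (st.1, st.2 ++ [v])

-- B's inner loop body over j in range(len(seg) - 2)
def bSegTriStep (seg : List Int) (vc : Int) (acc : List (List Int)) (j : Int) : List (List Int) :=
  let a := if PySem.Int.mod j 2 = 0 then PySem.List.pyGetD seg j 0 else PySem.List.pyGetD seg (j+1) 0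
  let b := if PySem.Int.mod j 2 = 0 then PySem.List.pyGetD seg (j+1) 0 else PySem.List.pyGetD seg j 0
  let c := PySem.List.pyGetD seg (j+2) 0
  if a ≠ b ∧ b ≠ c ∧ c ≠ a ∧ a < vc ∧ b < vc ∧ c < vc then acc ++ [[a, b, c]] else acc

def bSegTris (vc : Int) (seg : List Int) : List (List Int) :=
  (PySem.List.pyRange 0 (PySem.List.len seg - 2) 1).foldl (bSegTriStep seg vc) []

def get_triangle_from_trianglestrip_alt (TriStrip : List Int) (vertices_count : Int) : List (List Int) :=
  let st := TriStrip.foldl bSplitStep ([], [])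
  (st.1 ++ [st.2]).foldl (fun out seg => out ++ bSegTris vertices_count seg) []

-- ===== PRECONDITION & SPEC =====
def Spec_get_triangle_from_trianglestrip (TriStrip : List Int) (vertices_count : Int) (out : List (List Int)) : Prop := out = get_triangle_from_trianglestrip_alt TriStrip vertices_count
instance (TriStrip : List Int) (vertices_count : Int) (out : List (List Int)) : Decidable (Spec_get_triangle_from_trianglestrip TriStrip vertices_count out) := by unfold Spec_get_triangle_from_trianglestrip; infer_instance

-- ===== CLAIM (what is proved, stated in full; the proofs are below) =====
def Claim_equal_get_triangle_from_trianglestrip : Prop := ∀ (TriStrip : List Int) (vertices_count : Int), Dom_get_triangle_from_trianglestrip TriStrip vertices_count → Spec_get_triangle_from_trianglestrip TriStrip vertices_count (get_triangle_from_trianglestrip TriStrip vertices_count)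

-- ===== LEMMAS AND PROOFS =====

-- the triangle (possibly) emitted from window (x,y,z); p = true means odd winding (swap a/b)
def emitTri (vc x y z : Int) (p : Bool) : List (List Int) :=
  let a := if p then y else x
  let b := if p then x else y
  if a ≠ b ∧ b ≠ z ∧ z ≠ a ∧ a < vc ∧ b < vc ∧ z < vc then [[a, b, z]] else []

def goSeg (vc : Int) : List Int → Bool → List (List Int)
  | x :: y :: z :: rest, p => emitTri vc x y z p ++ goSeg vc (y :: z :: rest) (!p)
  | _, _ => []
termination_by l _ => l.length

-- A's loop, re-expressed structurally: window (x, y), remaining input, parity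
def goA (vc : Int) : Int → Int → List Int → Bool → List (List Int)
  | _, _, [], _ => []
  | x, y, z :: rest, p =>
    if z = 65535 ∨ y = 65535 ∨ x = 65535 then goA vc y z rest false
    else emitTri vc x y z p ++ goA vc y z rest (!p)

def goStart (vc : Int) : List Int → List (List Int)
  | x :: y :: rest => goA vc x y rest false
  | _ => []

def splitRec : List Int → List Int → List (List Int)
  | cur, [] => [cur]
  | cur, v :: xs => if v = 65535 then cur :: splitRec [] xs else splitRec (cur ++ [v]) xs

lemma drop_len {ts : List Int} {k : Nat} {x y : Int} {rest : List Int}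
    (h : ts.drop k = x :: y :: rest) : ts.length = k + 2 + rest.length := by
  have h1 := congrArg List.length h
  simp [List.length_drop] at h1
  omega

lemma clean_state (vc a b c : Int) (buf : List (List Int)) (cte : Int) :
    (if a ≠ b ∧ b ≠ c ∧ c ≠ a then
       if a < vc ∧ b < vc ∧ c < vc then (buf ++ [[a, b, c]], cte) else (buf, cte)
     else (buf, cte))
    = (buf ++ (if a ≠ b ∧ b ≠ c ∧ c ≠ a ∧ a < vc ∧ b < vc ∧ c < vc then [[a, b, c]] else []), cte) := by
  split_ifs <;> first | rfl | tauto | simp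

lemma emitTri_prop (vc x y z : Int) (P : Prop) [Decidable P] :
    emitTri vc x y z (!decide P)
      = if (if P then x else y) ≠ (if P then y else x) ∧ (if P then y else x) ≠ z ∧
           z ≠ (if P then x else y) ∧ (if P then x else y) < vc ∧ (if P then y else x) < vc ∧ z < vc
        then [[if P then x else y, if P then y else x, z]] else [] := by
  by_cases h : P <;> simp [emitTri, h]

lemma mod2_flip (a : Int) : (!decide (PySem.Int.mod (a+1) 2 = 0)) = decide (PySem.Int.mod a 2 = 0) := by
  rw [PySem.Int.mod_eq_emod_of_pos (by norm_num), PySem.Int.mod_eq_emod_of_pos (by norm_num)]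
  by_cases h : a % 2 = 0
  · have h1 : ¬ ((a+1) % 2 = 0) := by omega
    simp [h, h1]
  · have h1 : (a+1) % 2 = 0 := by omega
    simp [h, h1]

lemma aLoop (ts : List Int) (vc : Int) :
    ∀ (rest : List Int) (k : Nat) (x y : Int) (buf : List (List Int)) (cte : Int),
      ts.drop k = x :: y :: rest → (cte = 0 ∨ cte = -1) →
      ((PySem.List.pyRange ((k:Int)+2) (PySem.List.len ts) 1).foldl (aStep ts vc) (buf, cte)).1
        = buf ++ goA vc x y rest (!decide (PySem.Int.mod ((k:Int)+2+cte) 2 = 0)) := by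
  intro rest
  induction rest with
  | nil =>
    intro k x y buf cte hdrop hcte
    have hlen := drop_len hdrop
    simp only [List.length_nil] at hlen
    rw [PySem.List.pyRange_one_eq_nil (by simp [PySem.List.len_eq]; omega)]
    simp [goA]
  | cons z rest ih =>
    intro k x y buf cte hdrop hcte
    have hlen := drop_len hdrop
    simp only [List.length_cons] at hlen
    have hx : ts[k]? = some x := by
      have := congrArg (fun l => l[0]?) hdrop
      simpa [List.getElem?_drop] using this
    have hy : ts[k+1]? = some y := by
      have := congrArg (fun l => l[1]?) hdrop
      simpa [List.getElem?_drop] using this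
    have hz : ts[k+2]? = some z := by
      have := congrArg (fun l => l[2]?) hdrop
      simpa [List.getElem?_drop] using this
    have hdrop' : ts.drop (k+1) = y :: z :: rest := by
      have := congrArg List.tail hdrop
      simpa [List.tail_drop] using this
    have g0 : PySem.List.pyGetD ts ((k:Int)+2) 0 = z := by
      rw [show (k:Int)+2 = ((k+2:Nat):Int) by push_cast; ring, PySem.List.pyGetD_natCast]
      simp [List.getD_eq_getElem?_getD, hz]
    have g1 : PySem.List.pyGetD ts ((k:Int)+2-1) 0 = y := by
      rw [show (k:Int)+2-1 = ((k+1:Nat):Int) by push_cast; ring, PySem.List.pyGetD_natCast]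
      simp [List.getD_eq_getElem?_getD, hy]
    have g2 : PySem.List.pyGetD ts ((k:Int)+2-2) 0 = x := by
      rw [show (k:Int)+2-2 = ((k:Nat):Int) by ring, PySem.List.pyGetD_natCast]
      simp [List.getD_eq_getElem?_getD, hx]
    rw [PySem.List.pyRange_one_cons (by simp [PySem.List.len_eq]; omega)]
    simp only [List.foldl_cons]
    by_cases hs : z = 65535 ∨ y = 65535 ∨ x = 65535
    · have hstep : aStep ts vc (buf, cte) ((k:Int)+2)
          = (buf, if PySem.Int.mod ((k:Int)+2) 2 = 0 then -1 else 0) := by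
        unfold aStep
        simp only [g0, g1, g2]
        rw [if_pos hs]
      rw [hstep]
      have hcte' : (if PySem.Int.mod ((k:Int)+2) 2 = 0 then (-1:Int) else 0) = 0 ∨
          (if PySem.Int.mod ((k:Int)+2) 2 = 0 then (-1:Int) else 0) = -1 := by
        split_ifs <;> simp
      have hfold := ih (k+1) y z buf _ hdrop' hcte'
      rw [show ((k:Int)+2+1) = (((k+1:Nat)):Int)+2 by push_cast; ring, hfold]
      have hpar : (!decide (PySem.Int.mod ((((k+1:Nat)):Int)+2+(if PySem.Int.mod ((k:Int)+2) 2 = 0 then (-1:Int) else 0)) 2 = 0)) = false := by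
        split_ifs with h
        · rw [show ((k+1:Nat):Int)+2+(-1) = (k:Int)+2 by push_cast; ring,
            decide_eq_true h, Bool.not_true]
        · rw [show ((k+1:Nat):Int)+2+0 = ((k:Int)+2)+1 by push_cast; ring, mod2_flip]
          exact decide_eq_false h
      rw [hpar, goA, if_pos hs]
    · have hstep : aStep ts vc (buf, cte) ((k:Int)+2)
          = (buf ++ emitTri vc x y z (!decide (PySem.Int.mod ((k:Int)+2+cte) 2 = 0)), cte) := by
        simp only [aStep, g0, g1, g2]
        rw [if_neg hs, clean_state, emitTri_prop vc x y z (PySem.Int.mod ((k:Int)+2+cte) 2 = 0)]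
      rw [hstep]
      have hfold := ih (k+1) y z (buf ++ emitTri vc x y z (!decide (PySem.Int.mod ((k:Int)+2+cte) 2 = 0))) cte hdrop' hcte
      rw [show ((k:Int)+2+1) = (((k+1:Nat)):Int)+2 by push_cast; ring, hfold]
      have hpar : (!decide (PySem.Int.mod ((((k+1:Nat)):Int)+2+cte) 2 = 0))
          = !(!decide (PySem.Int.mod ((k:Int)+2+cte) 2 = 0)) := by
        rw [show ((k+1:Nat):Int)+2+cte = ((k:Int)+2+cte)+1 by push_cast; ring, mod2_flip, Bool.not_not]
      rw [hpar, goA, if_neg hs, List.append_assoc]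

lemma A_eq_goStart (ts : List Int) (vc : Int) :
    get_triangle_from_trianglestrip ts vc = goStart vc ts := by
  match ts with
  | [] =>
    unfold get_triangle_from_trianglestrip goStart
    rw [PySem.List.pyRange_one_eq_nil (by simp [PySem.List.len_eq])]
    rfl
  | [x] =>
    unfold get_triangle_from_trianglestrip goStart
    rw [PySem.List.pyRange_one_eq_nil (by simp [PySem.List.len_eq])]
    rfl
  | x :: y :: rest =>
    unfold get_triangle_from_trianglestrip goStart
    have h := aLoop (x :: y :: rest) vc rest 0 x y [] 0 (by simp) (Or.inl rfl)
    have hb : (!decide (PySem.Int.mod (((0:Nat):Int)+2+0) 2 = 0)) = false := by decide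
    rw [hb] at h
    rw [show (2:Int) = ((0:Nat):Int)+2 by norm_num, h]
    rfl

lemma splitLoop : ∀ (xs : List Int) (segs : List (List Int)) (cur : List Int),
    (xs.foldl bSplitStep (segs, cur)).1 ++ [(xs.foldl bSplitStep (segs, cur)).2]
      = segs ++ splitRec cur xs := by
  intro xs
  induction xs with
  | nil => intro segs cur; simp [splitRec]
  | cons v xs ih =>
    intro segs cur
    by_cases hv : v = 65535 <;>
      simp [bSplitStep, splitRec, hv, ih]

lemma segLoop (seg : List Int) (vc : Int) :
    ∀ (rest : List Int) (j : Nat) (x y : Int) (acc : List (List Int)),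
      seg.drop j = x :: y :: rest →
      (PySem.List.pyRange (j:Int) (PySem.List.len seg - 2) 1).foldl (bSegTriStep seg vc) acc
        = acc ++ goSeg vc (x :: y :: rest) (!decide (PySem.Int.mod (j:Int) 2 = 0)) := by
  intro rest
  induction rest with
  | nil =>
    intro j x y acc hdrop
    have hlen := drop_len hdrop
    simp only [List.length_nil] at hlen
    rw [PySem.List.pyRange_one_eq_nil (by simp [PySem.List.len_eq]; omega)]
    simp [goSeg]
  | cons z rest ih =>
    intro j x y acc hdrop
    have hlen := drop_len hdrop
    simp only [List.length_cons] at hlen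
    have hx : seg[j]? = some x := by
      have := congrArg (fun l => l[0]?) hdrop
      simpa [List.getElem?_drop] using this
    have hy : seg[j+1]? = some y := by
      have := congrArg (fun l => l[1]?) hdrop
      simpa [List.getElem?_drop] using this
    have hz : seg[j+2]? = some z := by
      have := congrArg (fun l => l[2]?) hdrop
      simpa [List.getElem?_drop] using this
    have hdrop' : seg.drop (j+1) = y :: z :: rest := by
      have := congrArg List.tail hdrop
      simpa [List.tail_drop] using this
    have g0 : PySem.List.pyGetD seg (j:Int) 0 = x := by
      rw [PySem.List.pyGetD_natCast]
      simp [List.getD_eq_getElem?_getD, hx]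
    have g1 : PySem.List.pyGetD seg ((j:Int)+1) 0 = y := by
      rw [show (j:Int)+1 = ((j+1:Nat):Int) by push_cast; ring, PySem.List.pyGetD_natCast]
      simp [List.getD_eq_getElem?_getD, hy]
    have g2 : PySem.List.pyGetD seg ((j:Int)+2) 0 = z := by
      rw [show (j:Int)+2 = ((j+2:Nat):Int) by push_cast; ring, PySem.List.pyGetD_natCast]
      simp [List.getD_eq_getElem?_getD, hz]
    rw [PySem.List.pyRange_one_cons (by simp [PySem.List.len_eq]; omega)]
    simp only [List.foldl_cons]
    have hstep : bSegTriStep seg vc acc (j:Int)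
        = acc ++ emitTri vc x y z (!decide (PySem.Int.mod (j:Int) 2 = 0)) := by
      simp only [bSegTriStep, g0, g1, g2]
      rw [emitTri_prop vc x y z (PySem.Int.mod (j:Int) 2 = 0)]
      split_ifs <;> simp
    rw [hstep]
    have hfold := ih (j+1) y z (acc ++ emitTri vc x y z (!decide (PySem.Int.mod (j:Int) 2 = 0))) hdrop'
    rw [show ((j:Int)+1) = (((j+1:Nat)):Int) by push_cast; ring, hfold]
    have hpar : (!decide (PySem.Int.mod (((j+1:Nat)):Int) 2 = 0))
        = !(!decide (PySem.Int.mod (j:Int) 2 = 0)) := by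
      rw [show ((j+1:Nat):Int) = (j:Int)+1 by push_cast; ring, mod2_flip, Bool.not_not]
    rw [hpar, goSeg, List.append_assoc]

lemma bSegTris_eq_goSeg (vc : Int) (seg : List Int) :
    bSegTris vc seg = goSeg vc seg false := by
  match seg with
  | [] =>
    unfold bSegTris
    rw [PySem.List.pyRange_one_eq_nil (by simp [PySem.List.len_eq])]
    simp [goSeg]
  | [x] =>
    unfold bSegTris
    rw [PySem.List.pyRange_one_eq_nil (by simp [PySem.List.len_eq])]
    simp [goSeg]
  | x :: y :: rest =>
    unfold bSegTris
    have h := segLoop (x :: y :: rest) vc rest 0 x y [] (by simp)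
    have hb : (!decide (PySem.Int.mod (((0:Nat)):Int) 2 = 0)) = false := by decide
    rw [hb] at h
    rw [show (0:Int) = ((0:Nat):Int) by norm_num, h]
    rfl

lemma B_eq_flatMap (ts : List Int) (vc : Int) :
    get_triangle_from_trianglestrip_alt ts vc
      = (splitRec [] ts).flatMap (fun s => goSeg vc s false) := by
  unfold get_triangle_from_trianglestrip_alt
  rw [PySem.List.foldl_append_eq_flatMap]
  have h := splitLoop ts [] []
  simp only [List.nil_append] at h
  rw [h, show (bSegTris vc) = (fun s => goSeg vc s false) from funext (bSegTris_eq_goSeg vc)]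
  simp

lemma M_sent2 (vc : Int) : ∀ (tl : List Int) (z : Int) (p : Bool),
    goA vc 65535 z tl p = goStart vc (z :: tl) := by
  intro tl z p
  cases tl with
  | nil => simp [goA, goStart]
  | cons w r => simp [goA, goStart]

lemma M_sent (vc : Int) : ∀ (tl : List Int) (y : Int) (p : Bool),
    goA vc y 65535 tl p = goStart vc tl := by
  intro tl y p
  cases tl with
  | nil => simp [goA, goStart]
  | cons z r => simp [goA, M_sent2]

lemma M_clean_all (vc : Int) : ∀ (rest : List Int) (x y : Int) (p : Bool),
    x ≠ 65535 → y ≠ 65535 → 65535 ∉ rest →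
    goA vc x y rest p = goSeg vc (x :: y :: rest) p := by
  intro rest
  induction rest with
  | nil => intro x y p _ _ _; simp [goA, goSeg]
  | cons z rest ih =>
    intro x y p hx hy hrest
    rw [List.mem_cons, not_or] at hrest
    rw [goA, goSeg, if_neg (by tauto), ih y z (!p) hy (Ne.symm hrest.1) hrest.2]

lemma M_clean_prefix (vc : Int) : ∀ (cl tl : List Int) (x y : Int) (p : Bool),
    x ≠ 65535 → y ≠ 65535 → 65535 ∉ cl →
    goA vc x y (cl ++ 65535 :: tl) p = goSeg vc (x :: y :: cl) p ++ goStart vc tl := by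
  intro cl
  induction cl with
  | nil =>
    intro tl x y p _ _ _
    simp [goA, goSeg, M_sent]
  | cons z cl ih =>
    intro tl x y p hx hy hcl
    rw [List.mem_cons, not_or] at hcl
    rw [List.cons_append, goA, if_neg (by tauto), goSeg,
      ih tl y z (!p) hy (Ne.symm hcl.1) hcl.2, List.append_assoc]

lemma S1 : ∀ (xs cur : List Int), 65535 ∉ xs → splitRec cur xs = [cur ++ xs] := by
  intro xs
  induction xs with
  | nil => intro cur _; simp [splitRec]
  | cons v xs ih =>
    intro cur hv
    rw [List.mem_cons, not_or] at hv
    rw [splitRec, if_neg (by tauto), ih (cur ++ [v]) hv.2]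
    simp

lemma S2 : ∀ (cl cur tl : List Int), 65535 ∉ cl →
    splitRec cur (cl ++ 65535 :: tl) = (cur ++ cl) :: splitRec [] tl := by
  intro cl
  induction cl with
  | nil => intro cur tl _; simp [splitRec]
  | cons v cl ih =>
    intro cur tl hv
    rw [List.mem_cons, not_or] at hv
    rw [List.cons_append, splitRec, if_neg (by tauto), ih (cur ++ [v]) tl hv.2]
    simp

lemma first_split : ∀ (l : List Int), 65535 ∈ l →
    ∃ cl tl, l = cl ++ 65535 :: tl ∧ 65535 ∉ cl := by
  intro l
  induction l with
  | nil => intro h; simp at h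
  | cons v l ih =>
    intro h
    by_cases hv : v = 65535
    · exact ⟨[], l, by simp [hv], by simp⟩
    · obtain ⟨cl, tl, hl, hcl⟩ := ih (by rcases List.mem_cons.mp h with h1 | h1; exacts [absurd h1.symm hv, h1])
      exact ⟨v :: cl, tl, by simp [hl], by simp [hcl]; exact fun hh => hv hh.symm⟩

lemma mainBridge (vc : Int) : ∀ (n : Nat) (ts : List Int), ts.length ≤ n →
    goStart vc ts = (splitRec [] ts).flatMap (fun s => goSeg vc s false) := by
  intro n
  induction n with
  | zero =>
    intro ts hts
    rw [List.length_eq_zero_iff.mp (Nat.le_zero.mp hts)]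
    simp [goStart, splitRec, goSeg]
  | succ n ih =>
    intro ts hts
    match ts with
    | [] => simp [goStart, splitRec, goSeg]
    | [x] =>
      by_cases hx : x = 65535 <;> simp [goStart, splitRec, hx, goSeg]
    | x :: y :: rest =>
      simp only [List.length_cons] at hts
      by_cases hx : x = 65535
      · subst hx
        rw [goStart, M_sent2, splitRec, if_pos rfl]
        simp only [List.flatMap_cons]
        rw [← ih (y :: rest) (by simp; omega)]
        simp [goSeg]
      · by_cases hy : y = 65535
        · subst hy
          rw [goStart, M_sent, splitRec, if_neg hx, splitRec, if_pos rfl]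
          simp only [List.flatMap_cons]
          rw [← ih rest (by omega)]
          simp [goSeg]
        · by_cases hr : (65535 : Int) ∈ rest
          · obtain ⟨cl, tl, hrest, hcl⟩ := first_split rest hr
            subst hrest
            rw [goStart, M_clean_prefix vc cl tl x y false hx hy hcl]
            rw [show x :: y :: (cl ++ 65535 :: tl) = (x :: y :: cl) ++ 65535 :: tl by simp]
            rw [S2 (x :: y :: cl) [] tl (by simp [hcl]; exact ⟨fun h => hx h.symm, fun h => hy h.symm⟩)]
            simp only [List.flatMap_cons, List.nil_append]
            rw [← ih tl (by simp at hts; omega)]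
          · rw [goStart, M_clean_all vc rest x y false hx hy hr,
              S1 (x :: y :: rest) [] (by simp [hr]; exact ⟨fun h => hx h.symm, fun h => hy h.symm⟩)]
            simp

-- ===== VERDICT (by name: the statement is the Claim_ definition above) =====
theorem get_triangle_from_trianglestrip_spec : Claim_equal_get_triangle_from_trianglestrip := by
  intro ts vc _
  unfold Spec_get_triangle_from_trianglestrip
  rw [A_eq_goStart, B_eq_flatMap]
  exact mainBridge vc ts.length ts le_rfl
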